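-- pv_equiv track=rewrite | github.com/esthel7/Baekjoon | 프로그래머스/lv2/87390. n＾2 배열 자르기/n＾2 배열 자르기.py | solution
-- ===== SOURCE A (Python) =====
-- def solution(n, left, right):
--     answer = []
--
--     leftF=left//n
--     leftL=left%n
--     rightF=right//n
--     rightL=right%n
--     if leftF==rightF:
--         for i in range(leftL,rightL+1):
--             answer.append(max(leftF+1,i+1))
--         return answer
--     for i in range(leftL,n):
--         answer.append(max(leftF+1,i+1))
--     for i in range(leftF+1,rightF+1):
--         for j in range(n):
--             if i==rightF and j>rightL:
--                 break
--             answer.append(max(i+1,j+1))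
--     return answer
-- ===== SOURCE B (Python) =====
-- def row_slice(n, r, a, b):
--     # values of row r at columns a..b-1: a run of (r+1)'s, then consecutive column numbers
--     flat = max(0, min(b, r + 1) - a)
--     return [r + 1] * flat + list(range(max(a, r + 1) + 1, b + 1))
--
-- def solution(n, left, right):
--     first_row, first_col = divmod(left, n)
--     last_row, last_col = divmod(right, n)
--     if first_row == last_row:
--         return row_slice(n, first_row, first_col, last_col + 1)
--     out = row_slice(n, first_row, first_col, n)
--     for r in range(first_row + 1, last_row + 1):
--         out += row_slice(n, r, 0, last_col + 1 if r == last_row else n)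
--     return out
-- ===== Notes on version B (the rewrite author's own statement) =====
-- stated objective: alternative
-- what changed: Each emitted row segment is built by run-length arithmetic (a computed-length run of r+1 followed by a consecutive integer range, bulk list operations) instead of A's per-cell max with a nested loop and a break; Pre_ excludes n = 0, where A raises ZeroDivisionError, and n < 0, which is outside the natural domain of a grid size although A happens to return values there.
-- outside the precondition, e.g. on solution(-3, 1, 0): A returns [], B returns [1]
import Mathlib
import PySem

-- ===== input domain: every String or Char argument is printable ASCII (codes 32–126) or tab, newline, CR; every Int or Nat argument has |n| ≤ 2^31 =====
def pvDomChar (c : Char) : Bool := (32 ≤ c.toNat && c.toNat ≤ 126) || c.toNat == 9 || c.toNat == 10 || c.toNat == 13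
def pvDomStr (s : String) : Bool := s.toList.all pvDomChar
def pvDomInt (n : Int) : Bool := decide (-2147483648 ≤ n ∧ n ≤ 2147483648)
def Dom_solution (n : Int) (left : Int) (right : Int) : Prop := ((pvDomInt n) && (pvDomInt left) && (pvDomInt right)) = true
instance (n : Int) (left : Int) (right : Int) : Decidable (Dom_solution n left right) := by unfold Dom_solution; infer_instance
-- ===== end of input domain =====

-- B builds each emitted row segment by run-length arithmetic (a computed-length run of r+1
-- followed by a consecutive integer range) instead of A's per-cell max with a nested loop
-- and a break.

-- ===== PORT A =====
-- inner 'for j in range(n): if i==rightF and j>rightL: break; answer.append(...)' with its break, step for step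
def pvInnerA (rightF rightL i : Int) : List Int → List Int → List Int
  | [], acc => acc
  | j :: js, acc =>
      if i = rightF ∧ rightL < j then acc
      else pvInnerA rightF rightL i js (acc ++ [max (i + 1) (j + 1)])

def solution (n : Int) (left : Int) (right : Int) : List Int :=
  let leftF := PySem.Int.floordiv left n
  let leftL := PySem.Int.mod left n
  let rightF := PySem.Int.floordiv right n
  let rightL := PySem.Int.mod right n
  if leftF = rightF then
    (PySem.List.pyRange leftL (rightL + 1) 1).foldl
      (fun acc i => acc ++ [max (leftF + 1) (i + 1)]) []
  else
    let acc1 := (PySem.List.pyRange leftL n 1).foldl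
      (fun acc i => acc ++ [max (leftF + 1) (i + 1)]) []
    (PySem.List.pyRange (leftF + 1) (rightF + 1) 1).foldl
      (fun acc i => pvInnerA rightF rightL i (PySem.List.pyRange 0 n 1) acc) acc1

-- ===== PORT B =====
-- values of row r at columns a..b-1: a run of (r+1)'s, then consecutive column numbers
def pvRowSlice (n r a b : Int) : List Int :=
  List.replicate (max 0 (min b (r + 1) - a)).toNat (r + 1)
    ++ PySem.List.pyRange (max a (r + 1) + 1) (b + 1) 1

def solution_alt (n : Int) (left : Int) (right : Int) : List Int :=
  let firstRow := PySem.Int.floordiv left n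
  let firstCol := PySem.Int.mod left n
  let lastRow := PySem.Int.floordiv right n
  let lastCol := PySem.Int.mod right n
  if firstRow = lastRow then
    pvRowSlice n firstRow firstCol (lastCol + 1)
  else
    (PySem.List.pyRange (firstRow + 1) (lastRow + 1) 1).foldl
      (fun out r => out ++ pvRowSlice n r 0 (if r = lastRow then lastCol + 1 else n))
      (pvRowSlice n firstRow firstCol n)

-- ===== PRECONDITION & SPEC =====
-- Pre_ excludes n = 0, where A raises ZeroDivisionError at left//n, and n < 0, which is
-- outside the natural domain of a grid size although A happens to return values there.
def Pre_solution (n : Int) (left : Int) (right : Int) : Prop := 0 < n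
instance (n : Int) (left : Int) (right : Int) : Decidable (Pre_solution n left right) := by unfold Pre_solution; infer_instance

def pvWitness_solution : Int × Int × Int := (3, 2, 6)

def Spec_solution (n : Int) (left : Int) (right : Int) (out : List Int) : Prop := out = solution_alt n left right
instance (n : Int) (left : Int) (right : Int) (out : List Int) : Decidable (Spec_solution n left right out) := by unfold Spec_solution; infer_instance

-- ===== CLAIM (what is proved, stated in full; the proofs are below) =====
def Claim_equal_solution : Prop := ∀ (n : Int) (left : Int) (right : Int), Dom_solution n left right → Pre_solution n left right → Spec_solution n left right (solution n left right)

-- ===== LEMMAS AND PROOFS =====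

theorem pvFoldPush (g : Int → Int) : ∀ (l acc : List Int),
    l.foldl (fun acc i => acc ++ [g i]) acc = acc ++ l.map g := by
  intro l
  induction l with
  | nil => simp
  | cons x xs ih => intro acc; simp [List.foldl_cons, ih]

theorem pvModPos (n a : Int) (hn : 0 < n) :
    0 ≤ PySem.Int.mod a n ∧ PySem.Int.mod a n < n := by
  rw [PySem.Int.mod_eq_emod_of_pos hn]
  exact ⟨Int.emod_nonneg a (by omega), Int.emod_lt_of_pos a hn⟩

theorem pvInnerA_no (rF rL i : Int) (hne : i ≠ rF) : ∀ (js acc : List Int),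
    pvInnerA rF rL i js acc = acc ++ js.map (fun j => max (i + 1) (j + 1)) := by
  intro js
  induction js with
  | nil => intro acc; simp [pvInnerA]
  | cons j js ih =>
      intro acc
      rw [pvInnerA, if_neg (by exact fun h => hne h.1), ih]
      simp

theorem pvInnerA_yes (rF rL : Int) : ∀ (xs ys acc : List Int),
    (∀ x ∈ xs, x ≤ rL) → (∀ y ∈ ys, rL < y) →
    pvInnerA rF rL rF (xs ++ ys) acc = acc ++ xs.map (fun j => max (rF + 1) (j + 1)) := by
  intro xs
  induction xs with
  | nil =>
      intro ys acc _ hys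
      cases ys with
      | nil => simp [pvInnerA]
      | cons y ys =>
          simp only [List.nil_append]
          rw [pvInnerA, if_pos ⟨rfl, hys y (by simp)⟩]
          simp
  | cons x xs ih =>
      intro ys acc hxs hys
      simp only [List.cons_append]
      rw [pvInnerA, if_neg (by
        intro h
        exact absurd (hxs x (by simp)) (not_le.mpr h.2))]
      rw [ih ys _ (fun z hz => hxs z (by simp [hz])) hys]
      simp

-- a run-length row segment is the pointwise-max row segment
theorem pvRowSliceNil (n r a b : Int) (h : b ≤ a) :
    pvRowSlice n r a b = (PySem.List.pyRange a b 1).map (fun c => max (r + 1) (c + 1)) := by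
  unfold pvRowSlice
  rw [PySem.List.pyRange_one_eq_nil h,
    PySem.List.pyRange_one_eq_nil (by omega : b + 1 ≤ max a (r + 1) + 1)]
  have hz : (max 0 (min b (r + 1) - a)).toNat = 0 := by omega
  rw [hz]
  simp

theorem pvRowSliceEq (n r : Int) : ∀ (k : Nat) (a b : Int), b - a ≤ (k : Int) →
    pvRowSlice n r a b = (PySem.List.pyRange a b 1).map (fun c => max (r + 1) (c + 1)) := by
  intro k
  induction k with
  | zero => intro a b h; exact pvRowSliceNil n r a b (by omega)
  | succ k ih =>
      intro a b h
      by_cases hab : b ≤ a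
      · exact pvRowSliceNil n r a b hab
      · have hlt : a < b := by omega
        rw [PySem.List.pyRange_one_cons hlt, List.map_cons, ← ih (a + 1) b (by omega)]
        unfold pvRowSlice
        by_cases hr : a < r + 1
        · have hcnt : (max 0 (min b (r + 1) - a)).toNat
              = (max 0 (min b (r + 1) - (a + 1))).toNat + 1 := by omega
          rw [hcnt, List.replicate_succ]
          have hm1 : max a (r + 1) = r + 1 := by omega
          have hm2 : max (a + 1) (r + 1) = r + 1 := by omega
          have hm3 : max (r + 1) (a + 1) = r + 1 := by omega
          rw [hm1, hm2, hm3]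
          simp
        · have hz1 : (max 0 (min b (r + 1) - a)).toNat = 0 := by omega
          have hz2 : (max 0 (min b (r + 1) - (a + 1))).toNat = 0 := by omega
          have hm1 : max a (r + 1) = a := by omega
          have hm2 : max (a + 1) (r + 1) = a + 1 := by omega
          have hm3 : max (r + 1) (a + 1) = a + 1 := by omega
          rw [hz1, hz2, hm1, hm2, hm3]
          simp only [List.replicate_zero, List.nil_append]
          exact PySem.List.pyRange_one_cons (by omega : a + 1 < b + 1)

theorem pvFoldCong (f g : List Int → Int → List Int) (h : ∀ acc x, f acc x = g acc x) :
    ∀ (l acc : List Int), l.foldl f acc = l.foldl g acc := by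
  intro l
  induction l with
  | nil => intro acc; rfl
  | cons x xs ih => intro acc; simp only [List.foldl_cons, h]; exact ih _

-- ===== VERDICT (by name: the statement is the Claim_ definition above) =====
theorem solution_spec : Claim_equal_solution := by
  intro n l r _ hpos
  show solution n l r = solution_alt n l r
  simp only [solution, solution_alt]
  obtain ⟨hlL0, hlLn⟩ := pvModPos n l hpos
  obtain ⟨hrL0, hrLn⟩ := pvModPos n r hpos
  by_cases h : PySem.Int.floordiv l n = PySem.Int.floordiv r n
  · rw [if_pos h, if_pos h, pvFoldPush,
      pvRowSliceEq n (PySem.Int.floordiv l n)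
        (PySem.Int.mod r n + 1 - PySem.Int.mod l n).toNat
        (PySem.Int.mod l n) (PySem.Int.mod r n + 1) (by omega)]
    simp
  · rw [if_neg h, if_neg h, pvFoldPush,
      pvRowSliceEq n (PySem.Int.floordiv l n)
        (n - PySem.Int.mod l n).toNat (PySem.Int.mod l n) n (by omega)]
    simp only [List.nil_append]
    apply pvFoldCong
    intro acc i
    by_cases hi : i = PySem.Int.floordiv r n
    · subst hi
      rw [if_pos rfl,
        PySem.List.pyRange_one_append 0 (PySem.Int.mod r n + 1) n (by omega) (by omega),
        pvInnerA_yes (PySem.Int.floordiv r n) (PySem.Int.mod r n)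
          (PySem.List.pyRange 0 (PySem.Int.mod r n + 1) 1)
          (PySem.List.pyRange (PySem.Int.mod r n + 1) n 1) acc
          (fun x hx => by have := (PySem.List.mem_pyRange_one).mp hx; omega)
          (fun y hy => by have := (PySem.List.mem_pyRange_one).mp hy; omega),
        pvRowSliceEq n (PySem.Int.floordiv r n) (PySem.Int.mod r n + 1).toNat 0
          (PySem.Int.mod r n + 1) (by omega)]
    · rw [if_neg hi, pvInnerA_no (PySem.Int.floordiv r n) (PySem.Int.mod r n) i hi,
        pvRowSliceEq n i n.toNat 0 n (by omega)]
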